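-- pv_equiv track=rewrite | github.com/Ali-Ghasemi-Tech/Daneshkar | homeworks/HW2/zip_code.py | is_zip_code
-- ===== SOURCE A (Python) =====
-- def is_zip_code(param: str) -> bool:
--     if '-' in param and len(param) == 11:
--         zip_code_numbers : list = param.split('-')
--
--         #check if input is only numbers
--         for i in param:
--             if i != '-':
--                 if i in '123456789':
--                     continue
--                 else:
--                     return False
--
--         if len(zip_code_numbers) != 2:
--             return False
--         else:
--             for number in zip_code_numbers:
--                 if len(number) != 5 :
--                     return False
--                 else:
--                     return True
--     else:
--         return False
-- ===== SOURCE B (Python) =====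
-- import re
--
-- _ZIP_RE = re.compile(r'[1-9]{5}-[1-9]{5}')
--
-- def is_zip_code(param: str) -> bool:
--     return bool(_ZIP_RE.fullmatch(param))
-- ===== Notes on version B (the rewrite author's own statement) =====
-- stated objective: idiomatic
-- what changed: Replaced A's multi-pass scan (substring test, split on '-', a char loop and per-piece length checks) by a single anchored regex fullmatch r'[1-9]{5}-[1-9]{5}'.
import Mathlib
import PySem

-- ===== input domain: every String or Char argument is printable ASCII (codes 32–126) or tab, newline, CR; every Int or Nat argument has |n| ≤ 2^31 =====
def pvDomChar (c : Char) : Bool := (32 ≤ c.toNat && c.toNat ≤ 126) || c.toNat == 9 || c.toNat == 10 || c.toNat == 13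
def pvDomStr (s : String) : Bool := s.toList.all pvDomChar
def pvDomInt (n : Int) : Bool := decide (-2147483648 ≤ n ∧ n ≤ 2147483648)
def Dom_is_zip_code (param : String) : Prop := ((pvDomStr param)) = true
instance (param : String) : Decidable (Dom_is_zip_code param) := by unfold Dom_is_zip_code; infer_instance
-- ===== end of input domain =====

-- B replaces A's multi-pass scan (substring test, split, char loop, per-piece length checks)
-- by a single anchored regex-style match of the pattern [1-9]{5}-[1-9]{5} (idiomatic; same cost).

-- ===== PORT A =====
-- the 'for i in param: …' loop: 'some b' = early return b, 'none' = loop ran through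
def zipCharsLoop : List Char → Option Bool
  | [] => none
  | i :: rest =>
    if i ≠ '-' then
      if PySem.Chars.isIn [i] "123456789".toList then zipCharsLoop rest
      else some false
    else zipCharsLoop rest

-- the 'for number in zip_code_numbers: …' loop: returns on its first iteration
def zipNumsLoop : List (List Char) → Option Bool
  | [] => none
  | number :: _ => if number.length ≠ 5 then some false else some true

def is_zip_code (param : String) : Bool :=
  if PySem.Str.isIn "-" param && (PySem.Str.len param == 11) then
    let zip_code_numbers := PySem.Chars.splitOn param.toList ['-']
    match zipCharsLoop param.toList with
    | some b => b
    | none =>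
      if zip_code_numbers.length ≠ 2 then false
      else
        match zipNumsLoop zip_code_numbers with
        | some b => b
        | none => false  -- Python would fall off the loop (length-2 list, unreachable)
  else false

-- ===== PORT B =====
-- the regex char class [1-9]
def isNonZeroDigit (c : Char) : Bool := decide ('1' ≤ c) && decide (c ≤ '9')

-- hand port of bool(re.fullmatch(r'[1-9]{5}-[1-9]{5}', param)): exact — an anchored match of this
-- pattern is precisely: length 11, positions 0–4 and 6–10 in the class [1-9], position 5 = '-'
def is_zip_code_alt (param : String) : Bool :=
  let cs := param.toList
  (cs.length == 11) && (cs.take 5).all isNonZeroDigit && (cs[5]? == some '-')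
    && (cs.drop 6).all isNonZeroDigit

-- ===== PRECONDITION & SPEC =====
def Spec_is_zip_code (param : String) (out : Bool) : Prop := out = is_zip_code_alt param
instance (param : String) (out : Bool) : Decidable (Spec_is_zip_code param out) := by unfold Spec_is_zip_code; infer_instance

-- ===== CLAIM (what is proved, stated in full; the proofs are below) =====
def Claim_equal_is_zip_code : Prop := ∀ (param : String), Dom_is_zip_code param → Spec_is_zip_code param (is_zip_code param)

-- ===== LEMMAS AND PROOFS =====

-- membership in the Python digit string '123456789' is exactly the regex class [1-9]
theorem isIn_digits_eq (c : Char) :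
    (PySem.Chars.isIn [c] "123456789".toList) = isNonZeroDigit c := by
  have hd : "123456789".toList = ['1','2','3','4','5','6','7','8','9'] := by decide
  unfold isNonZeroDigit
  rw [Bool.eq_iff_iff, PySem.Chars.isIn_iff_infix, List.singleton_infix_iff, hd]
  simp only [Bool.and_eq_true, decide_eq_true_eq, List.mem_cons, List.not_mem_nil, or_false]
  have he : ∀ d : Char, c.toNat = d.toNat → c = d := fun d h => Char.ext (UInt32.toNat_inj.mp h)
  have hle : ∀ a b : Char, a ≤ b ↔ a.toNat ≤ b.toNat := fun a b => by
    rw [Char.le_def, UInt32.le_iff_toNat_le]; rfl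
  constructor
  · rintro (h|h|h|h|h|h|h|h|h) <;> subst h <;> exact ⟨by decide, by decide⟩
  · rintro ⟨h1, h2⟩
    rw [hle] at h1 h2
    have h49 : ('1' : Char).toNat = 49 := by decide
    have h57 : ('9' : Char).toNat = 57 := by decide
    have : c.toNat = 49 ∨ c.toNat = 50 ∨ c.toNat = 51 ∨ c.toNat = 52 ∨ c.toNat = 53 ∨
        c.toNat = 54 ∨ c.toNat = 55 ∨ c.toNat = 56 ∨ c.toNat = 57 := by omega
    rcases this with h|h|h|h|h|h|h|h|h
    · exact Or.inl (he '1' (by rw [h]; decide))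
    · exact Or.inr (Or.inl (he '2' (by rw [h]; decide)))
    · exact Or.inr (Or.inr (Or.inl (he '3' (by rw [h]; decide))))
    · exact Or.inr (Or.inr (Or.inr (Or.inl (he '4' (by rw [h]; decide)))))
    · exact Or.inr (Or.inr (Or.inr (Or.inr (Or.inl (he '5' (by rw [h]; decide))))))
    · exact Or.inr (Or.inr (Or.inr (Or.inr (Or.inr (Or.inl (he '6' (by rw [h]; decide)))))))
    · exact Or.inr (Or.inr (Or.inr (Or.inr (Or.inr (Or.inr (Or.inl (he '7' (by rw [h]; decide))))))))
    · exact Or.inr (Or.inr (Or.inr (Or.inr (Or.inr (Or.inr (Or.inr (Or.inl (he '8' (by rw [h]; decide)))))))))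
    · exact Or.inr (Or.inr (Or.inr (Or.inr (Or.inr (Or.inr (Or.inr (Or.inr (he '9' (by rw [h]; decide)))))))))

-- the char loop runs through (no early return) iff every char is '-' or a [1-9] digit
theorem zipCharsLoop_eq_none_iff (l : List Char) :
    zipCharsLoop l = none ↔ ∀ c ∈ l, c = '-' ∨ isNonZeroDigit c = true := by
  induction l with
  | nil => simp [zipCharsLoop]
  | cons c rest ih =>
    by_cases hc : c = '-'
    · subst hc
      rw [show zipCharsLoop ('-' :: rest) = zipCharsLoop rest by simp [zipCharsLoop], ih]
      constructor
      · intro h x hx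
        rcases List.mem_cons.mp hx with rfl | hx
        · exact Or.inl rfl
        · exact h x hx
      · intro h x hx; exact h x (List.mem_cons_of_mem _ hx)
    · by_cases hd : isNonZeroDigit c = true
      · rw [show zipCharsLoop (c :: rest) = zipCharsLoop rest by
          simp only [zipCharsLoop, isIn_digits_eq]; simp [hc, hd], ih]
        constructor
        · intro h x hx
          rcases List.mem_cons.mp hx with rfl | hx
          · exact Or.inr hd
          · exact h x hx
        · intro h x hx; exact h x (List.mem_cons_of_mem _ hx)
      · rw [show zipCharsLoop (c :: rest) = some false by
          simp only [zipCharsLoop, isIn_digits_eq]; simp [hc, hd]]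
        constructor
        · intro h; cases h
        · intro h
          exfalso
          rcases h c List.mem_cons_self with h' | h'
          · exact hc h'
          · exact hd h'

-- PySem's fueled splitter on a one-char separator is Mathlib's List.splitOn
theorem splitOn_go_spec (d : Char) :
    ∀ (fuel : Nat) (l : List Char), l.length ≤ fuel → ∀ (cur : List Char) (acc : List (List Char)),
      PySem.Chars.splitOn.go [d] fuel l cur acc
        = acc.reverse ++ (List.splitOn d l).modifyHead (cur.reverse ++ ·) := by
  intro fuel
  induction fuel with
  | zero =>
    intro l hl cur acc
    have : l = [] := List.length_eq_zero_iff.mp (Nat.le_zero.mp hl)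
    subst this
    simp [PySem.Chars.splitOn.go, List.splitOn, List.splitOnP_nil]
  | succ f ih =>
    intro l hl cur acc
    cases l with
    | nil => simp [PySem.Chars.splitOn.go, List.splitOn, List.splitOnP_nil]
    | cons c rest =>
      have hrest : rest.length ≤ f := by simpa using hl
      by_cases hc : c = d
      · subst hc
        have hpre : List.isPrefixOf [c] (c :: rest) = true := by
          simp [List.isPrefixOf]
        rw [show PySem.Chars.splitOn.go [c] (f+1) (c :: rest) cur acc
              = PySem.Chars.splitOn.go [c] f (List.drop 1 (c :: rest)) [] (cur.reverse :: acc) by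
            simp [PySem.Chars.splitOn.go, hpre]]
        simp only [List.drop_one, List.tail_cons]
        rw [ih rest hrest [] (cur.reverse :: acc)]
        have : List.splitOn c (c :: rest) = [] :: List.splitOn c rest := by
          simp [List.splitOn, List.splitOnP_cons]
        rw [this]
        cases h : List.splitOn c rest with
        | nil => exact absurd h (List.splitOnP_ne_nil _ _)
        | cons p ps => simp
      · have hpre : List.isPrefixOf [d] (c :: rest) = false := by
          simp [List.isPrefixOf]
          exact fun h => hc h.symm
        rw [show PySem.Chars.splitOn.go [d] (f+1) (c :: rest) cur acc
              = PySem.Chars.splitOn.go [d] f rest (c :: cur) acc by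
            simp [PySem.Chars.splitOn.go, hpre]]
        rw [ih rest hrest (c :: cur) acc]
        have : List.splitOn d (c :: rest) = (List.splitOn d rest).modifyHead (c :: ·) := by
          simp [List.splitOn, List.splitOnP_cons]
          intro h; exact absurd h hc
        rw [this]
        cases h : List.splitOn d rest with
        | nil => exact absurd h (List.splitOnP_ne_nil _ _)
        | cons p ps => simp [List.modifyHead]

theorem chars_splitOn_eq (d : Char) (l : List Char) :
    PySem.Chars.splitOn l [d] = List.splitOn d l := by
  unfold PySem.Chars.splitOn
  rw [splitOn_go_spec d (l.length + 1) l (by omega) [] []]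
  cases h : List.splitOn d l with
  | nil => exact absurd h (List.splitOnP_ne_nil _ _)
  | cons p ps => simp [List.modifyHead]

-- pieces of List.splitOn never contain the separator
theorem not_mem_of_mem_splitOn (d : Char) (l : List Char) :
    ∀ p ∈ List.splitOn d l, d ∉ p := by
  induction l with
  | nil => intro p hp; simp [List.splitOn, List.splitOnP_nil] at hp; simp [hp]
  | cons c rest ih =>
    intro p hp
    by_cases hc : c = d
    · subst hc
      rw [show List.splitOn c (c :: rest) = [] :: List.splitOn c rest by
        simp [List.splitOn, List.splitOnP_cons]] at hp
      rcases List.mem_cons.mp hp with h | h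
      · simp [h]
      · exact ih p h
    · rw [show List.splitOn d (c :: rest) = (List.splitOn d rest).modifyHead (c :: ·) by
        simp [List.splitOn, List.splitOnP_cons]
        intro h; exact absurd h hc] at hp
      cases h : List.splitOn d rest with
      | nil => exact absurd h (List.splitOnP_ne_nil _ _)
      | cons q qs =>
        rw [h] at hp
        simp [List.modifyHead] at hp
        rcases hp with hp | hp
        · subst hp
          intro hmem
          rcases List.mem_cons.mp hmem with h' | h'
          · exact hc h'.symm
          · exact ih q (h ▸ List.mem_cons_self) h'
        · exact ih p (h ▸ List.mem_cons_of_mem _ hp)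

-- splitting p ++ d :: q at d, with d-free pieces, gives exactly [p, q]
theorem splitOn_of_no_sep (d : Char) (q : List Char) (hq : d ∉ q) :
    List.splitOn d q = [q] := by
  induction q with
  | nil => simp [List.splitOn, List.splitOnP_nil]
  | cons c rest ih =>
    have hc : c ≠ d := fun h => hq (h ▸ List.mem_cons_self)
    have hrest : d ∉ rest := fun h => hq (List.mem_cons_of_mem _ h)
    rw [show List.splitOn d (c :: rest) = (List.splitOn d rest).modifyHead (c :: ·) by
      simp [List.splitOn, List.splitOnP_cons]
      intro h; exact absurd h hc]
    rw [ih hrest]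
    simp [List.modifyHead]

theorem splitOn_two_pieces (d : Char) (p q : List Char) (hp : d ∉ p) (hq : d ∉ q) :
    List.splitOn d (p ++ d :: q) = [p, q] := by
  induction p with
  | nil =>
    rw [show List.splitOn d (([] : List Char) ++ d :: q) = [] :: List.splitOn d q by
      simp [List.splitOn, List.splitOnP_cons]]
    rw [splitOn_of_no_sep d q hq]
  | cons c rest ih =>
    have hc : c ≠ d := fun h => hp (h ▸ List.mem_cons_self)
    have hrest : d ∉ rest := fun h => hp (List.mem_cons_of_mem _ h)
    rw [show List.splitOn d ((c :: rest) ++ d :: q) = (List.splitOn d (rest ++ d :: q)).modifyHead (c :: ·) by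
      simp [List.splitOn, List.splitOnP_cons]
      intro h; exact absurd h hc]
    rw [ih hrest]
    simp [List.modifyHead]

-- the char loop can only early-return false, never true
theorem zipCharsLoop_ne_some_true (l : List Char) : zipCharsLoop l ≠ some true := by
  induction l with
  | nil => simp [zipCharsLoop]
  | cons c rest ih =>
    simp only [zipCharsLoop]
    by_cases hc : c = '-'
    · simpa [hc] using ih
    · by_cases hd : PySem.Chars.isIn [c] ['1','2','3','4','5','6','7','8','9'] = true
      · simpa [hc, show "123456789".toList = ['1','2','3','4','5','6','7','8','9'] by decide, hd] using ih
      · simp [hc, show "123456789".toList = ['1','2','3','4','5','6','7','8','9'] by decide, hd]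

-- ===== VERDICT (by name: the statement is the Claim_ definition above) =====
theorem is_zip_code_spec : Claim_equal_is_zip_code := by
  intro param _
  unfold Spec_is_zip_code is_zip_code is_zip_code_alt
  set l := param.toList with hl
  rw [Bool.eq_iff_iff]
  simp only [PySem.Str.isIn_eq, PySem.Str.len_eq, ← hl, Bool.and_eq_true]
  constructor
  · -- A accepts → B accepts
    intro hA
    by_cases hcond : (PySem.Chars.isIn "-".toList l && ((l.length : Int) == 11)) = true
    swap
    · rw [if_neg (by simpa using hcond)] at hA; exact absurd hA (by simp)
    rw [if_pos (by simpa using hcond)] at hA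
    have hlen : l.length = 11 := by
      have h := (Bool.and_eq_true ..).mp hcond |>.2
      rw [beq_iff_eq] at h
      exact_mod_cast h
    cases hloop : zipCharsLoop l with
    | some b =>
      rw [hloop] at hA; subst hA
      -- 'some true' is impossible for zipCharsLoop: it only early-returns false
      exact absurd hloop (zipCharsLoop_ne_some_true l)
    | none =>
      rw [hloop] at hA
      by_cases h2 : (PySem.Chars.splitOn l ['-']).length ≠ 2
      · rw [if_pos h2] at hA; exact absurd hA (by simp)
      rw [if_neg h2] at hA
      rw [not_not] at h2
      rw [chars_splitOn_eq] at h2 hA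
      obtain ⟨p, q, hpq⟩ : ∃ p q, List.splitOn '-' l = [p, q] := by
        cases hs : List.splitOn '-' l with
        | nil => exact absurd hs (List.splitOnP_ne_nil _ _)
        | cons a t =>
          cases t with
          | nil => rw [hs] at h2; simp at h2
          | cons b t2 =>
            cases t2 with
            | nil => exact ⟨a, b, rfl⟩
            | cons u t3 => rw [hs] at h2; simp at h2
      rw [hpq] at hA
      simp only [zipNumsLoop] at hA
      by_cases hp5 : p.length ≠ 5
      · rw [if_pos hp5] at hA; exact absurd hA (by simp)
      rw [if_neg hp5] at hA
      rw [not_not] at hp5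
      -- reconstruct l = p ++ '-' :: q
      have hrec : l = p ++ '-' :: q := by
        have := List.intercalate_splitOn l '-'
        rw [hpq] at this
        simpa [List.intercalate] using this.symm
      have hql : q.length = 5 := by
        have := congrArg List.length hrec
        simp at this
        omega
      have hpd : '-' ∉ p := not_mem_of_mem_splitOn '-' l p (hpq ▸ List.mem_cons_self)
      have hqd : '-' ∉ q :=
        not_mem_of_mem_splitOn '-' l q (hpq ▸ List.mem_cons_of_mem _ List.mem_cons_self)
      have hall := (zipCharsLoop_eq_none_iff l).mp hloop
      have hdig : ∀ c ∈ p ++ q, isNonZeroDigit c = true := by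
        intro c hc
        rcases List.mem_append.mp hc with h | h
        · rcases hall c (hrec ▸ List.mem_append_left _ h) with h' | h'
          · exact absurd (h' ▸ h) hpd
          · exact h'
        · rcases hall c (hrec ▸ List.mem_append_right _ (List.mem_cons_of_mem _ h)) with h' | h'
          · exact absurd (h' ▸ h) hqd
          · exact h'
      have htake : l.take 5 = p := by rw [← hp5, hrec]; exact List.take_left
      have hdrop : l.drop 6 = q := by
        rw [hrec, List.drop_append, show 6 - p.length = 1 by omega,
          List.drop_of_length_le (by omega)]
        simp
      have hget : l[5]? = some '-' := by
        rw [hrec, List.getElem?_append_right (by omega), show 5 - p.length = 0 by omega]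
        simp
      refine ⟨⟨⟨by simp [hlen], ?_⟩, by simp [hget]⟩, ?_⟩
      · rw [htake]
        exact List.all_eq_true.mpr fun c hc => hdig c (List.mem_append_left _ hc)
      · rw [hdrop]
        exact List.all_eq_true.mpr fun c hc => hdig c (List.mem_append_right _ hc)
  · -- B accepts → A accepts
    rintro ⟨⟨⟨hlen, htake⟩, hget⟩, hdrop⟩
    have hlen : l.length = 11 := by
      rw [beq_iff_eq] at hlen; exact hlen
    have hget : l[5]? = some '-' := by rw [beq_iff_eq] at hget; exact hget
    set p := l.take 5 with hp
    set q := l.drop 6 with hq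
    have hpl : p.length = 5 := by simp [hp, hlen]
    have hql : q.length = 5 := by simp [hq, hlen]
    have h5 : l[5]'(by omega) = '-' := by
      rw [List.getElem?_eq_getElem (by omega)] at hget
      simpa using hget
    have hrec : l = p ++ '-' :: q := by
      conv_lhs => rw [← List.take_append_drop 5 l]
      rw [hp, hq]
      congr 1
      rw [List.drop_eq_getElem_cons (by omega : 5 < l.length), h5]
    have hpdig : ∀ c ∈ p, isNonZeroDigit c = true := List.all_eq_true.mp htake
    have hqdig : ∀ c ∈ q, isNonZeroDigit c = true := List.all_eq_true.mp hdrop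
    have hdash_not : isNonZeroDigit '-' = false := by decide
    have hpd : '-' ∉ p := fun h => by rw [hpdig _ h] at hdash_not; cases hdash_not
    have hqd : '-' ∉ q := fun h => by rw [hqdig _ h] at hdash_not; cases hdash_not
    have hcond : (PySem.Chars.isIn "-".toList l && (((l.length : Int)) == 11)) = true := by
      refine (Bool.and_eq_true ..).mpr ⟨?_, by rw [hlen]; rfl⟩
      rw [show "-".toList = ['-'] by decide, PySem.Chars.isIn_iff_infix,
        List.singleton_infix_iff, hrec]
      exact List.mem_append_right _ List.mem_cons_self
    rw [if_pos (by simpa using hcond)]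
    have hloop : zipCharsLoop l = none := by
      rw [zipCharsLoop_eq_none_iff]
      intro c hc
      rw [hrec] at hc
      rcases List.mem_append.mp hc with h | h
      · exact Or.inr (hpdig c h)
      · rcases List.mem_cons.mp h with h | h
        · exact Or.inl h
        · exact Or.inr (hqdig c h)
    rw [hloop]
    rw [chars_splitOn_eq, hrec, splitOn_two_pieces '-' p q hpd hqd]
    simp [zipNumsLoop, hpl]
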